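-- pv_equiv track=rewrite | github.com/JeffMudrei/Esparta | euclidean.py | solution
-- ===== SOURCE A (Python) =====
-- def solution(n,m):
--     '''Função solution
--     dados dois numeros N e M checa o numero de vezes que para em locais diferentes Ex:
--     N = 10 e M = 4 vai parar em 0, 4, 8, 2, 6. Nesse exemplo vai retornar 5'''
--     inicio = 0
--     resto = 0
--     cont = 1
--     while ((inicio + m) % n != 0):
--         resto = (inicio + m) % n
--         inicio = resto
--         cont += 1
--     return (cont)
-- ===== SOURCE B (Python) =====
-- def solution(n, m):
--     # number of distinct stops when stepping by m on a circle of size n: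
--     # closed form abs(n) // gcd(n, m), gcd by Euclid's algorithm.
--     a, b = abs(n), abs(m)
--     while b:
--         a, b = b, a % b
--     return abs(n) // a
-- ===== Notes on version B (the rewrite author's own statement) =====
-- stated objective: faster
-- what changed: Replaces the step-by-step simulation of the cycle (one loop iteration per distinct stop) by the closed form abs(n)//gcd(n,m) computed with Euclid's algorithm.
import Mathlib
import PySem

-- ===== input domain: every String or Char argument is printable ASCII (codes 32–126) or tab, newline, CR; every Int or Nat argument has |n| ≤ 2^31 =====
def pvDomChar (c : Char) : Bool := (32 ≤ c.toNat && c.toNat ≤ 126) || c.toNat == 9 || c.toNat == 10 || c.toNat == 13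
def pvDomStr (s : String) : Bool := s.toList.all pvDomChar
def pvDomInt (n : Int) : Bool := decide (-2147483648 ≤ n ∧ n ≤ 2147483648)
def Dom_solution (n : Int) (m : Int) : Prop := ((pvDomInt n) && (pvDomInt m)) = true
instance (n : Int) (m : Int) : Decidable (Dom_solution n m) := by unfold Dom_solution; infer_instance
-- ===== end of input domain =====

-- B replaces A's per-stop simulation loop by the closed form |n| // gcd(n,m) (Euclid): asymptotically faster.
-- A raises ZeroDivisionError when n = 0; Pre_solution excludes exactly those inputs.

-- ===== PORT A =====
-- A's while-loop, transliterated with fuel n.natAbs: under Pre_solution (n ≠ 0) the loop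
-- performs at most n.natAbs - 1 iterations, so the fuel-exhausted branch is never reached.
def solutionLoop (n m : Int) : Nat → Int → Int → Int
  | 0, _, cont => cont
  | fuel + 1, inicio, cont =>
    if PySem.Int.mod (inicio + m) n ≠ 0 then
      solutionLoop n m fuel (PySem.Int.mod (inicio + m) n) (cont + 1)
    else cont

def solution (n : Int) (m : Int) : Int := solutionLoop n m n.natAbs 0 1

-- ===== PORT B =====
-- Source B's Euclid loop: while b: a, b = b, a % b  (on the absolute values, which are Nats)
def gcdLoop : Nat → Nat → Nat
  | a, 0 => a
  | a, b + 1 => gcdLoop (b + 1) (a % (b + 1))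
decreasing_by exact Nat.mod_lt _ (Nat.succ_pos _)

def solution_alt (n : Int) (m : Int) : Int :=
  PySem.Int.floordiv (n.natAbs : Int) ((gcdLoop n.natAbs m.natAbs : Nat) : Int)

-- ===== PRECONDITION & SPEC =====
-- Pre_ excludes exactly n = 0, where A's '% n' raises ZeroDivisionError.
def Pre_solution (n : Int) (m : Int) : Prop := n ≠ 0
instance (n : Int) (m : Int) : Decidable (Pre_solution n m) := by unfold Pre_solution; infer_instance
def pvWitness_solution : Int × Int := (10, 4)

def Spec_solution (n : Int) (m : Int) (out : Int) : Prop := out = solution_alt n m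
instance (n : Int) (m : Int) (out : Int) : Decidable (Spec_solution n m out) := by unfold Spec_solution; infer_instance

-- ===== CLAIM (what is proved, stated in full; the proofs are below) =====
def Claim_equal_solution : Prop := ∀ (n : Int) (m : Int), Dom_solution n m → Pre_solution n m → Spec_solution n m (solution n m)

-- ===== LEMMAS AND PROOFS =====

lemma gcdLoop_eq_gcd : ∀ b a : Nat, gcdLoop a b = Nat.gcd a b := by
  intro b
  induction b using Nat.strong_induction_on with
  | _ b ih =>
    intro a
    match b with
    | 0 => simp [gcdLoop]
    | b + 1 =>
      rw [gcdLoop, ih (a % (b + 1)) (Nat.mod_lt _ (Nat.succ_pos _)),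
        Nat.gcd_comm a (b + 1), Nat.gcd_rec (b + 1) a, Nat.gcd_comm]

-- minimal-period divisibility: n ∣ k·m  ↔  (|n|/gcd) ∣ k
lemma dvd_mul_iff (n m : Int) (hn : n ≠ 0) (k : Nat) :
    n ∣ (k : Int) * m ↔ (n.natAbs / Nat.gcd n.natAbs m.natAbs) ∣ k := by
  set N := n.natAbs with hN
  set M := m.natAbs with hM
  set g := Nat.gcd N M with hg
  have hN0 : 0 < N := Int.natAbs_pos.mpr hn
  have hg0 : 0 < g := Nat.gcd_pos_of_pos_left M hN0
  have h1 : n ∣ (k : Int) * m ↔ N ∣ k * M := by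
    rw [← Int.natAbs_dvd_natAbs, Int.natAbs_mul]
    simp [hN, hM]
  have hNg : g * (N / g) = N := Nat.mul_div_cancel' (Nat.gcd_dvd_left N M)
  have hMg : g * (M / g) = M := Nat.mul_div_cancel' (Nat.gcd_dvd_right N M)
  have hco : Nat.Coprime (N / g) (M / g) := Nat.coprime_div_gcd_div_gcd hg0
  have h2 : N ∣ k * M ↔ (N / g) ∣ k * (M / g) := by
    conv_lhs => rw [← hNg, ← hMg]
    rw [show k * (g * (M / g)) = g * (k * (M / g)) by ring]
    exact Nat.mul_dvd_mul_iff_left hg0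
  rw [h1, h2]
  constructor
  · exact fun h => hco.dvd_of_dvd_mul_right h
  · exact fun h => Dvd.dvd.mul_right h (M / g)

lemma mod_sub_dvd (x n : Int) : n ∣ (PySem.Int.mod x n - x) := by
  have h := PySem.Int.floordiv_mul_add_mod x n
  exact ⟨-(PySem.Int.floordiv x n), by linarith [h]⟩

lemma loop_eq (n m : Int) (hn : n ≠ 0) :
    ∀ (fuel k : Nat) (inicio : Int), 1 ≤ k →
      k ≤ n.natAbs / Nat.gcd n.natAbs m.natAbs →
      n ∣ (inicio - ((k : Int) - 1) * m) →
      n.natAbs / Nat.gcd n.natAbs m.natAbs - k ≤ fuel →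
      solutionLoop n m fuel inicio (k : Int) =
        ((n.natAbs / Nat.gcd n.natAbs m.natAbs : Nat) : Int) := by
  intro fuel
  induction fuel with
  | zero =>
    intro k inicio hk1 hk2 _ hfuel
    have : k = n.natAbs / Nat.gcd n.natAbs m.natAbs := by omega
    simp [solutionLoop, this]
  | succ fuel ih =>
    intro k inicio hk1 hk2 hinv hfuel
    have hdd : n ∣ (inicio + m - (k : Int) * m) := by
      rw [show inicio + m - (k : Int) * m = inicio - ((k : Int) - 1) * m by ring]
      exact hinv
    have hiff : PySem.Int.mod (inicio + m) n = 0 ↔ n ∣ (k : Int) * m := by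
      rw [PySem.Int.mod_eq_zero_iff_dvd]
      constructor
      · intro h
        have h3 := dvd_sub h hdd
        rw [show inicio + m - (inicio + m - (k : Int) * m) = (k : Int) * m by ring] at h3
        exact h3
      · intro h
        have h3 := dvd_add h hdd
        rw [show (k : Int) * m + (inicio + m - (k : Int) * m) = inicio + m by ring] at h3
        exact h3
    rw [solutionLoop]
    split_ifs with hc
    · -- condition true: (inicio + m) % n ≠ 0, so k0 does not divide k, so k < k0
      have hnd : ¬ (n.natAbs / Nat.gcd n.natAbs m.natAbs) ∣ k := by
        intro h
        exact hc (hiff.mpr ((dvd_mul_iff n m hn k).mpr h))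
      have hklt : k < n.natAbs / Nat.gcd n.natAbs m.natAbs := by
        rcases Nat.lt_or_ge k (n.natAbs / Nat.gcd n.natAbs m.natAbs) with h | h
        · exact h
        · have hkeq : k = n.natAbs / Nat.gcd n.natAbs m.natAbs := by omega
          exact absurd (hkeq ▸ dvd_refl _) hnd
      have hinv' : n ∣ (PySem.Int.mod (inicio + m) n - (((k + 1 : Nat) : Int) - 1) * m) := by
        have h4 := dvd_add (mod_sub_dvd (inicio + m) n) hdd
        rw [show (PySem.Int.mod (inicio + m) n - (inicio + m)) + (inicio + m - (k : Int) * m)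
              = PySem.Int.mod (inicio + m) n - (k : Int) * m by ring] at h4
        push_cast
        rw [show ((k : Int) + 1 - 1) * m = (k : Int) * m by ring]
        exact h4
      have := ih (k + 1) (PySem.Int.mod (inicio + m) n) (by omega) (by omega) hinv' (by omega)
      rw [show ((k : Int) + 1) = (((k + 1 : Nat) : Int)) by push_cast; ring]
      exact this
    · -- condition false: n ∣ k·m, so k0 ∣ k, and with 1 ≤ k ≤ k0, k = k0
      have hdvd : (n.natAbs / Nat.gcd n.natAbs m.natAbs) ∣ k :=
        (dvd_mul_iff n m hn k).mp (hiff.mp (by simpa using hc))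
      have hle := Nat.le_of_dvd (by omega) hdvd
      have : k = n.natAbs / Nat.gcd n.natAbs m.natAbs := by omega
      exact_mod_cast congrArg (Nat.cast : Nat → Int) this

theorem solution_spec : Claim_equal_solution := by
  unfold Claim_equal_solution
  intro n m _ hn
  unfold Spec_solution solution solution_alt
  have hN0 : 0 < n.natAbs := Int.natAbs_pos.mpr hn
  have hg0 : 0 < Nat.gcd n.natAbs m.natAbs := Nat.gcd_pos_of_pos_left _ hN0
  have hk01 : 1 ≤ n.natAbs / Nat.gcd n.natAbs m.natAbs :=
    Nat.div_pos (Nat.le_of_dvd hN0 (Nat.gcd_dvd_left _ _)) hg0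
  rw [gcdLoop_eq_gcd]
  rw [show ((n.natAbs : Int)) = ((n.natAbs : Nat) : Int) from rfl,
    PySem.Int.floordiv_natCast]
  have h := loop_eq n m hn n.natAbs 1 0 le_rfl hk01 (by simp)
    (by have := Nat.div_le_self n.natAbs (Nat.gcd n.natAbs m.natAbs); omega)
  simpa using h
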